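-- pv_equiv track=rewrite | github.com/HITESH-235/Python_Exercise | Bit_Manipulation/Minimise_XOR.py | minimiseXOR
-- ===== SOURCE A (Python) =====
-- def minimiseXOR(num1, num2):
--     def countSetBits(num): # counts set bits so we can divide cases from values of c1, c2
--         dup = num
--         c = 0
--         while dup != 0:
--             dup &= dup-1
--             c += 1
--         return c
--     c1 = countSetBits(num1)
--     c2 = countSetBits(num2)
--
--     if c1 == c2: return num1
--
--     res = 0
--     if c1 < c2: # cases where we have more 1s available in num2
--         i = 0
--         while c2 >0:
--             if num1 & (1<<i) != 0: # when ith bit is set, must add it to res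
--                 res ^= (1<<i)
--                 c1 -= 1
--                 c2 -= 1
--                 i += 1
--             else:
--                 if c2-c1 > 0: # settings bits in res even when num1 is unset (at i)
--                     while c2-c1 > 0 and num1 & (1<<i) == 0: # doing it for rightmost unset bits
--                         c2 -= 1
--                         res += (1<<i)
--                         i += 1
--                 else:
--                     i += 1
--     else:
--         dup = num1 # cases where there are more set bits in num1 (hence not all can be reached)
--         while c1-c2 > 0: # thus we toggle left most set bits from res
--             dup &= (dup-1)
--             c1 -= 1
--         return dup # thus in this case result will be left most bits
--     return res
-- ===== SOURCE B (Python) =====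
-- def minimiseXOR(num1, num2):
--     def popcount(n):
--         c = 0
--         while n != 0:
--             c += n & 1
--             n >>= 1
--         return c
--     target = popcount(num2)
--     res = num1
--     while popcount(res) > target:  # too many set bits: drop lowest set bits
--         res &= res - 1
--     cnt = popcount(res)
--     i = 0
--     while cnt < target:            # too few set bits: set lowest unset bits
--         if res & (1 << i) == 0:
--             res |= 1 << i
--             cnt += 1
--         i += 1
--     return res
-- ===== Notes on version B (the rewrite author's own statement) =====
-- stated objective: simpler
-- what changed: A splits into three cases (equal counts / build result bit-by-bit with a nested fill loop / strip loop) over XOR-accumulated state; B uniformly starts from num1 and runs two flat loops: drop lowest set bits while the popcount is too high, then set lowest unset bits while it is too low.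
import Mathlib
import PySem

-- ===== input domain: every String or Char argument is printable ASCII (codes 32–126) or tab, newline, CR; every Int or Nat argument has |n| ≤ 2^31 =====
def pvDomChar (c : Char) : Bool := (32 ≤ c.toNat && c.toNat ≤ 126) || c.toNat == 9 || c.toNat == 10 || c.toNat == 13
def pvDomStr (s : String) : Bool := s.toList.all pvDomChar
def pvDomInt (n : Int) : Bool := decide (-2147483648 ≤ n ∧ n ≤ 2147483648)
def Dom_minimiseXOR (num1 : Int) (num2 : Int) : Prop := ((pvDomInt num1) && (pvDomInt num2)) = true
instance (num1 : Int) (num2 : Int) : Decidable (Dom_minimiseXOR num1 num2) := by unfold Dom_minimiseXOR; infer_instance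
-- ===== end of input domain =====

-- B replaces A's three-way case analysis with a uniform strip-lowest-set-bits /
-- fill-lowest-unset-bits pass over num1 (objective: simpler; no speed claim).
-- On negative inputs both Pythons loop forever, so Pre_ restricts to nonnegative inputs.

-- ===== PORT A =====
-- `while dup != 0: dup &= dup-1; c += 1` (fuel num.natAbs+1 covers every terminating run)
def csbLoop : Nat → Int → Int → Int
  | 0, _, c => c
  | f+1, dup, c => if dup ≠ 0 then csbLoop f (Int.land dup (dup - 1)) (c + 1) else c

def countSetBitsA (num : Int) : Int := csbLoop (num.natAbs + 1) num 0

-- inner `while c2-c1 > 0 and num1 & (1<<i) == 0: c2 -= 1; res += (1<<i); i += 1`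
def aInner : Nat → Int → Int → Int → Int → Nat → (Int × Int × Nat)
  | 0, _, res, _, c2, i => (res, c2, i)
  | f+1, num1, res, c1, c2, i =>
    if c2 - c1 > 0 ∧ Int.land num1 (Int.shiftLeft 1 i) = 0 then
      aInner f num1 (res + Int.shiftLeft 1 i) c1 (c2 - 1) (i + 1)
    else (res, c2, i)

-- outer `while c2 > 0` of the c1 < c2 branch
def aOuter : Nat → Int → Int → Int → Int → Nat → Int
  | 0, _, res, _, _, _ => res
  | f+1, num1, res, c1, c2, i =>
    if c2 > 0 then
      if Int.land num1 (Int.shiftLeft 1 i) ≠ 0 then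
        aOuter f num1 (Int.xor res (Int.shiftLeft 1 i)) (c1 - 1) (c2 - 1) (i + 1)
      else
        if c2 - c1 > 0 then
          match aInner (f+1) num1 res c1 c2 i with
          | (res', c2', i') => aOuter f num1 res' c1 c2' i'
        else aOuter f num1 res c1 c2 (i + 1)
    else res

-- `while c1-c2 > 0: dup &= dup-1; c1 -= 1`
def aStrip : Nat → Int → Int → Int → Int
  | 0, dup, _, _ => dup
  | f+1, dup, c1, c2 => if c1 - c2 > 0 then aStrip f (Int.land dup (dup - 1)) (c1 - 1) c2 else dup

def minimiseXOR (num1 : Int) (num2 : Int) : Int :=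
  let c1 := countSetBitsA num1
  let c2 := countSetBitsA num2
  if c1 = c2 then num1
  else if c1 < c2 then
    aOuter (2 * num1.natAbs + num2.natAbs + 2) num1 0 c1 c2 0
  else
    aStrip (num1.natAbs + 1) num1 c1 c2

-- ===== PORT B =====
-- `while n != 0: c += n & 1; n >>= 1`
def popLoop : Nat → Int → Int → Int
  | 0, _, c => c
  | f+1, n, c => if n ≠ 0 then popLoop f (Int.shiftRight n 1) (c + Int.land n 1) else c

def popcountB (n : Int) : Int := popLoop (n.natAbs + 1) n 0

-- `while popcount(res) > target: res &= res - 1`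
def bStrip : Nat → Int → Int → Int
  | 0, res, _ => res
  | f+1, res, target =>
    if popcountB res > target then bStrip f (Int.land res (res - 1)) target else res

-- `while cnt < target: if res & (1<<i) == 0: res |= 1<<i; cnt += 1
--  i += 1`
def bFill : Nat → Int → Int → Int → Nat → Int
  | 0, res, _, _, _ => res
  | f+1, res, cnt, target, i =>
    if cnt < target then
      if Int.land res (Int.shiftLeft 1 i) = 0 then
        bFill f (Int.lor res (Int.shiftLeft 1 i)) (cnt + 1) target (i + 1)
      else
        bFill f res cnt target (i + 1)
    else res

def minimiseXOR_alt (num1 : Int) (num2 : Int) : Int :=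
  let target := popcountB num2
  let res := bStrip (num1.natAbs + 1) num1 target
  bFill (num1.natAbs + num2.natAbs + 2) res (popcountB res) target 0

-- ===== PRECONDITION & SPEC =====
-- On any negative argument the Python `while n != 0: n &= n-1` loop (in A's
-- countSetBits) never terminates, so A returns on exactly the nonnegative inputs.
def Pre_minimiseXOR (num1 : Int) (num2 : Int) : Prop := 0 ≤ num1 ∧ 0 ≤ num2
instance (num1 : Int) (num2 : Int) : Decidable (Pre_minimiseXOR num1 num2) := by
  unfold Pre_minimiseXOR; infer_instance
def pvWitness_minimiseXOR : Int × Int := (25, 72)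

def Spec_minimiseXOR (num1 : Int) (num2 : Int) (out : Int) : Prop := out = minimiseXOR_alt num1 num2
instance (num1 : Int) (num2 : Int) (out : Int) : Decidable (Spec_minimiseXOR num1 num2 out) := by
  unfold Spec_minimiseXOR; infer_instance

-- ===== CLAIM (what is proved, stated in full; the proofs are below) =====
def Claim_equal_minimiseXOR : Prop := ∀ (num1 : Int) (num2 : Int), Dom_minimiseXOR num1 num2 → Pre_minimiseXOR num1 num2 → Spec_minimiseXOR num1 num2 (minimiseXOR num1 num2)

-- ===== LEMMAS AND PROOFS =====

-- Nat-level reference popcount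
def pcN (n : Nat) : Nat :=
  if n = 0 then 0 else pcN (n / 2) + n % 2
decreasing_by exact Nat.div_lt_self (Nat.pos_of_ne_zero (by assumption)) one_lt_two

theorem pcN_zero : pcN 0 = 0 := by unfold pcN; simp

theorem pcN_rec (n : Nat) : pcN n = pcN (n / 2) + n % 2 := by
  by_cases h : n = 0
  · subst h; simp [pcN_zero]
  · rw [pcN]; simp [h]

theorem pcN_eq_zero_iff (n : Nat) : pcN n = 0 ↔ n = 0 := by
  induction n using Nat.strong_induction_on with
  | _ n ih =>
    by_cases h : n = 0
    · simp [h, pcN_zero]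
    · rw [pcN_rec n]
      constructor
      · intro he
        have h2 : pcN (n / 2) = 0 := by omega
        have := (ih (n / 2) (Nat.div_lt_self (Nat.pos_of_ne_zero h) one_lt_two)).mp h2
        omega
      · intro he; exact absurd he h

theorem pcN_le (n : Nat) : pcN n ≤ n := by
  induction n using Nat.strong_induction_on with
  | _ n ih =>
    by_cases h : n = 0
    · simp [h, pcN_zero]
    · rw [pcN_rec n]
      have := ih (n / 2) (Nat.div_lt_self (Nat.pos_of_ne_zero h) one_lt_two)
      omega

theorem testBit_parity (m i : Nat) : m.testBit i = decide (m >>> i % 2 = 1) :=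
  (Nat.decide_shiftRight_mod_two_eq_one).symm

-- `n & (n-1)` clears the lowest set bit
theorem land_pred_odd (m : Nat) : (2 * m + 1) &&& (2 * m) = 2 * m := by
  apply Nat.eq_of_testBit_eq
  intro j
  rw [Nat.testBit_land]
  cases j with
  | zero =>
    simp [Nat.testBit_zero, Nat.mul_add_mod]
  | succ j =>
    have h1 : (2 * m + 1) / 2 = m := by omega
    have h2 : (2 * m) / 2 = m := by omega
    simp [Nat.testBit_succ, h1, h2]

theorem land_pred_even (m : Nat) (hm : m ≠ 0) :
    (2 * m) &&& (2 * m - 1) = 2 * ((m &&& (m - 1))) := by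
  apply Nat.eq_of_testBit_eq
  intro j
  cases j with
  | zero =>
    simp [Nat.testBit_land, Nat.testBit_zero, Nat.mul_mod_right, Nat.mul_mod_left]
  | succ j =>
    have h1 : (2 * m) / 2 = m := by omega
    have h2 : (2 * m - 1) / 2 = m - 1 := by omega
    have h3 : (2 * (m &&& (m - 1))) / 2 = m &&& (m - 1) := by omega
    simp only [Nat.testBit_land]
    simp only [Nat.testBit_succ]
    rw [h1, h2, h3, Nat.testBit_land]

theorem pcN_land_pred (n : Nat) (hn : n ≠ 0) : pcN (n &&& (n - 1)) + 1 = pcN n := by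
  induction n using Nat.strong_induction_on with
  | _ n ih =>
    rcases Nat.even_or_odd n with he | ho
    · obtain ⟨m, hm⟩ := he
      have hm2 : n = 2 * m := by omega
      subst hm2
      have hmne : m ≠ 0 := by omega
      rw [land_pred_even m hmne]
      have hrec : pcN (2 * ((m &&& (m - 1)))) = pcN (m &&& (m - 1)) := by
        rw [pcN_rec (2 * (m &&& (m - 1)))]
        have : (2 * (m &&& (m - 1))) / 2 = m &&& (m - 1) := by omega
        rw [this]; omega
      rw [hrec]
      have hm2' : pcN (2 * m) = pcN m := by
        rw [pcN_rec (2 * m)]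
        have : (2 * m) / 2 = m := by omega
        rw [this]; omega
      rw [hm2']
      exact ih m (by omega) hmne
    · obtain ⟨m, hm⟩ := ho
      subst hm
      have h1 : 2 * m + 1 - 1 = 2 * m := by omega
      rw [h1, land_pred_odd m]
      rw [pcN_rec (2 * m + 1), pcN_rec (2 * m)]
      have h2 : (2 * m + 1) / 2 = m := by omega
      have h3 : (2 * m) / 2 = m := by omega
      rw [h2, h3]; omega

-- iterated `n &= n-1`
def stripIter : Nat → Nat → Nat
  | m, 0 => m
  | m, k+1 => stripIter (m &&& (m - 1)) k

theorem pcN_stripIter (k m : Nat) (h : k ≤ pcN m) :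
    pcN (stripIter m k) = pcN m - k := by
  induction k generalizing m with
  | zero => simp [stripIter]
  | succ k ih =>
    have hm : m ≠ 0 := by
      intro h0; subst h0; simp [pcN_zero] at h
    have hl := pcN_land_pred m hm
    rw [stripIter, ih _ (by omega)]
    omega

-- bit arithmetic helpers
theorem or_mul_two_pow (a h i : Nat) (ha : a < 2 ^ i) :
    a ||| 2 ^ i * h = a + 2 ^ i * h := by
  rw [Nat.lor_comm, ← Nat.two_pow_add_eq_or_of_lt ha h]
  ring

theorem xor_two_pow_of_lt (a i : Nat) (ha : a < 2 ^ i) :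
    a ^^^ 2 ^ i = a + 2 ^ i := by
  have hor : a ||| 2 ^ i = a + 2 ^ i := by
    have := or_mul_two_pow a 1 i ha
    simpa using this
  rw [← hor]
  apply Nat.eq_of_testBit_eq
  intro j
  rw [Nat.testBit_xor, Nat.testBit_or, Nat.testBit_two_pow]
  by_cases hji : i = j
  · subst hji
    have : a.testBit i = false := Nat.testBit_lt_two_pow ha
    simp [this]
  · simp [hji]

theorem testBit_false_lt (a i : Nat) (h1 : a < 2 ^ (i + 1)) (h2 : a.testBit i = false) :
    a < 2 ^ i := by
  have hp : 0 < 2 ^ i := Nat.two_pow_pos i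
  have hd : a / 2 ^ i < 2 := by
    rw [Nat.div_lt_iff_lt_mul hp]
    calc a < 2 ^ (i + 1) := h1
    _ = 2 * 2 ^ i := by ring
  rw [Nat.testBit_eq_decide_div_mod_eq, decide_eq_false_iff_not] at h2
  have hx : a / 2 ^ i = 0 ∨ a / 2 ^ i = 1 := by
    rcases Nat.lt_succ_iff_lt_or_eq.mp hd with h | h
    · left; exact Nat.lt_one_iff.mp h
    · right; exact h
  rcases hx with hx | hx
  · exact Nat.lt_of_div_eq_zero hp hx
  · rw [hx] at h2; simp at h2

theorem lor_two_pow_of_unset (a i : Nat) (ha : a.testBit i = false) :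
    a ||| 2 ^ i = a + 2 ^ i := by
  have hp : 0 < 2 ^ (i + 1) := Nat.two_pow_pos _
  have hdm := Nat.div_add_mod a (2 ^ (i + 1))
  set q := a / 2 ^ (i + 1) with hq
  set r := a % 2 ^ (i + 1) with hr
  have hrlt : r < 2 ^ (i + 1) := Nat.mod_lt _ hp
  have hbit : r.testBit i = false := by
    rw [hr, Nat.testBit_mod_two_pow]
    simp [ha]
  have hri : r < 2 ^ i := testBit_false_lt r i hrlt hbit
  have hsum : r + 2 ^ i < 2 ^ (i + 1) := by
    have : (2:Nat) ^ (i+1) = 2 ^ i + 2 ^ i := by ring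
    omega
  have e1 : a = 2 ^ (i + 1) * q ||| r := by
    rw [← Nat.two_pow_add_eq_or_of_lt hrlt q]; omega
  have e2 : r ||| 2 ^ i = r + 2 ^ i := by
    have := or_mul_two_pow r 1 i hri
    simpa using this
  calc a ||| 2 ^ i = (2 ^ (i + 1) * q ||| r) ||| 2 ^ i := by rw [← e1]
    _ = 2 ^ (i + 1) * q ||| (r ||| 2 ^ i) := Nat.lor_assoc _ _ _
    _ = 2 ^ (i + 1) * q ||| (r + 2 ^ i) := by rw [e2]
    _ = 2 ^ (i + 1) * q + (r + 2 ^ i) := (Nat.two_pow_add_eq_or_of_lt hsum q).symm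
    _ = a + 2 ^ i := by omega

theorem shiftRight_add_two_pow (a i : Nat) (ha : a.testBit i = false) :
    (a + 2 ^ i) >>> (i + 1) = a >>> (i + 1) := by
  have hp : 0 < 2 ^ (i + 1) := Nat.two_pow_pos _
  have hdm := Nat.div_add_mod a (2 ^ (i + 1))
  set q := a / 2 ^ (i + 1) with hq
  set r := a % 2 ^ (i + 1) with hr
  have hrlt : r < 2 ^ (i + 1) := Nat.mod_lt _ hp
  have hbit : r.testBit i = false := by
    rw [hr, Nat.testBit_mod_two_pow]
    simp [ha]
  have hri : r < 2 ^ i := testBit_false_lt r i hrlt hbit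
  have hsum : r + 2 ^ i < 2 ^ (i + 1) := by
    have : (2:Nat) ^ (i+1) = 2 ^ i + 2 ^ i := by ring
    omega
  rw [Nat.shiftRight_eq_div_pow, Nat.shiftRight_eq_div_pow]
  have e1 : a + 2 ^ i = 2 ^ (i + 1) * q + (r + 2 ^ i) := by omega
  rw [e1, Nat.mul_add_div hp, Nat.div_eq_of_lt hsum]
  have e2 : a = 2 ^ (i + 1) * q + r := by omega
  rw [e2, Nat.mul_add_div hp, Nat.div_eq_of_lt hrlt]

theorem testBit_add_mul (a h i : Nat) (ha : a < 2 ^ i) :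
    (a + 2 ^ i * h).testBit i = decide (h % 2 = 1) := by
  have hp : 0 < 2 ^ i := Nat.two_pow_pos i
  rw [Nat.testBit_eq_decide_div_mod_eq]
  have e : (a + 2 ^ i * h) / 2 ^ i = h := by
    rw [mul_comm, Nat.add_mul_div_right _ _ hp, Nat.div_eq_of_lt ha]
    omega
  rw [e]

theorem pcN_sr_succ (m i : Nat) :
    pcN (m >>> i) = pcN (m >>> (i + 1)) + (m >>> i) % 2 := by
  rw [pcN_rec (m >>> i), Nat.shiftRight_succ]

theorem sr_odd (m i : Nat) (h : m.testBit i = true) : (m >>> i) % 2 = 1 := by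
  have := testBit_parity m i
  rw [h] at this
  exact of_decide_eq_true this.symm

theorem sr_even (m i : Nat) (h : m.testBit i = false) : (m >>> i) % 2 = 0 := by
  have := testBit_parity m i
  rw [h] at this
  have := of_decide_eq_false this.symm
  omega


-- Int↔Nat transfer (definitional on nonnegative operands)
theorem land_cast (a b : Nat) : Int.land (a:Int) (b:Int) = ((a &&& b : Nat) : Int) := rfl
theorem lor_cast (a b : Nat) : Int.lor (a:Int) (b:Int) = ((a ||| b : Nat) : Int) := rfl
theorem xor_cast (a b : Nat) : Int.xor (a:Int) (b:Int) = ((a ^^^ b : Nat) : Int) := rfl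
theorem shl_cast (a i : Nat) : Int.shiftLeft (a:Int) i = ((a <<< i : Nat) : Int) := rfl
theorem shr_cast (a i : Nat) : Int.shiftRight (a:Int) i = ((a >>> i : Nat) : Int) := rfl

theorem one_shl (i : Nat) : Int.shiftLeft (1:Int) i = ((2 ^ i : Nat) : Int) := by
  rw [show (1:Int) = ((1:Nat):Int) from rfl, shl_cast]
  norm_num [Nat.shiftLeft_eq]

theorem land_pow_zero_iff (m i : Nat) :
    Int.land (m:Int) (Int.shiftLeft 1 i) = 0 ↔ m.testBit i = false := by
  rw [one_shl, land_cast, Nat.and_two_pow]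
  cases h : m.testBit i <;>
    simp [h, Nat.ne_of_gt (Nat.two_pow_pos i)]

-- set the lowest k unset bits of res at positions ≥ i
def fillZ (res i k : Nat) : Nat :=
  if hk : k = 0 then res
  else if hb : res.testBit i then fillZ res (i+1) k
  else fillZ (res + 2 ^ i) (i+1) (k-1)
termination_by k + pcN (res >>> i)
decreasing_by
  · have hp := pcN_sr_succ res i
    rw [sr_odd res i hb] at hp
    omega
  · have hs := shiftRight_add_two_pow res i (by simpa using hb)
    have hp := pcN_sr_succ res i
    rw [hs]
    omega

theorem fillZ_zero (res i : Nat) : fillZ res i 0 = res := by rw [fillZ]; simp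

theorem fillZ_set (res i k : Nat) (h : res.testBit i = true) (hk : k ≠ 0) :
    fillZ res i k = fillZ res (i+1) k := by
  rw [fillZ]; simp [h, hk]

theorem fillZ_unset (res i k : Nat) (h : res.testBit i = false) (hk : k ≠ 0) :
    fillZ res i k = fillZ (res + 2 ^ i) (i+1) (k-1) := by
  rw [fillZ]; simp [h, hk]

-- A's countSetBits computes pcN
theorem csbLoop_eq (f : Nat) : ∀ (m : Nat) (c : Int), m ≤ f →
    csbLoop f (m:Int) c = c + (pcN m : Int) := by
  induction f with
  | zero =>
    intro m c h
    have : m = 0 := by omega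
    subst this
    simp [csbLoop, pcN_zero]
  | succ f ih =>
    intro m c h
    by_cases hm : m = 0
    · subst hm; simp [csbLoop, pcN_zero]
    · have hcast : ((m:Int)) ≠ 0 := by exact_mod_cast hm
      have hsub : ((m:Int) - 1) = ((m - 1 : Nat) : Int) := by omega
      have hle : m &&& (m - 1) ≤ f := by
        have := Nat.and_le_right (n := m) (m := m - 1)
        omega
      have hpc := pcN_land_pred m hm
      simp only [csbLoop, if_pos hcast, hsub, land_cast, ih _ _ hle]
      omega

theorem countSetBitsA_eq (m : Nat) : countSetBitsA (m:Int) = (pcN m : Int) := by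
  unfold countSetBitsA
  rw [Int.natAbs_natCast, csbLoop_eq (m+1) m 0 (by omega), zero_add]

-- B's popcount computes pcN
theorem popLoop_eq (f : Nat) : ∀ (m : Nat) (c : Int), m ≤ f →
    popLoop f (m:Int) c = c + (pcN m : Int) := by
  induction f with
  | zero =>
    intro m c h
    have : m = 0 := by omega
    subst this
    simp [popLoop, pcN_zero]
  | succ f ih =>
    intro m c h
    by_cases hm : m = 0
    · subst hm; simp [popLoop, pcN_zero]
    · have hcast : ((m:Int)) ≠ 0 := by exact_mod_cast hm
      have hshr : m >>> 1 = m / 2 := by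
        rw [show (1:Nat) = 0 + 1 from rfl, Nat.shiftRight_succ, Nat.shiftRight_zero]
      have hand : m &&& 1 = m % 2 := Nat.and_one_is_mod m
      have hle : m / 2 ≤ f := by omega
      have hpc := pcN_rec m
      simp only [popLoop, if_pos hcast,
        show (1:Int) = ((1:Nat):Int) from rfl, land_cast, shr_cast,
        hshr, hand, ih _ _ hle]
      push_cast
      omega

theorem popcountB_eq (m : Nat) : popcountB (m:Int) = (pcN m : Int) := by
  unfold popcountB
  rw [Int.natAbs_natCast, popLoop_eq (m+1) m 0 (by omega), zero_add]


-- A's `while c1-c2 > 0` strip loop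
theorem aStrip_eq (f : Nat) : ∀ (k m : Nat) (c1 c2 : Int), c1 - c2 = (k:Int) →
    k ≤ pcN m → k ≤ f → aStrip f (m:Int) c1 c2 = (stripIter m k : Int) := by
  induction f with
  | zero =>
    intro k m c1 c2 hk hpc hf
    have : k = 0 := by omega
    subst this
    simp [aStrip, stripIter]
  | succ f ih =>
    intro k m c1 c2 hk hpc hf
    cases k with
    | zero =>
      have hng : ¬ (c1 - c2 > 0) := by omega
      simp only [aStrip, if_neg hng, stripIter]
    | succ k =>
      have hg : c1 - c2 > 0 := by omega
      have hm : m ≠ 0 := by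
        intro h0; subst h0; simp [pcN_zero] at hpc
      have hsub : ((m:Int) - 1) = ((m - 1 : Nat) : Int) := by omega
      have hpcp := pcN_land_pred m hm
      simp only [aStrip, if_pos hg, hsub, land_cast, stripIter]
      exact ih k _ _ _ (by omega) (by omega) (by omega)

-- B's `while popcount(res) > target` strip loop
theorem bStrip_eq (f : Nat) : ∀ (m t : Nat), pcN m ≤ f →
    bStrip f (m:Int) (t:Int) = (stripIter m (pcN m - t) : Int) := by
  induction f with
  | zero =>
    intro m t h
    have hm : m = 0 := by
      have := (pcN_eq_zero_iff m).mp (by omega)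
      exact this
    subst hm
    simp [bStrip, pcN_zero, stripIter]
  | succ f ih =>
    intro m t h
    by_cases hgt : t < pcN m
    · have hcond : popcountB (m:Int) > (t:Int) := by
        rw [popcountB_eq]; exact_mod_cast hgt
      have hm : m ≠ 0 := by
        intro h0; subst h0; simp [pcN_zero] at hgt
      have hsub : ((m:Int) - 1) = ((m - 1 : Nat) : Int) := by omega
      have hpcp := pcN_land_pred m hm
      have hstep : pcN m - t = (pcN (m &&& (m - 1)) - t) + 1 := by omega
      simp only [bStrip, if_pos hcond, hsub, land_cast, hstep, stripIter]
      exact ih _ _ (by omega)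
    · have hcond : ¬ (popcountB (m:Int) > (t:Int)) := by
        rw [popcountB_eq]; exact_mod_cast hgt
      have : pcN m - t = 0 := by omega
      simp only [bStrip, if_neg hcond, this, stripIter]

-- B's fill loop computes fillZ
theorem bFill_eq (f : Nat) : ∀ (res cnt t i : Nat), cnt ≤ t →
    (t - cnt) + pcN (res >>> i) ≤ f →
    bFill f (res:Int) (cnt:Int) (t:Int) i = (fillZ res i (t - cnt) : Int) := by
  induction f with
  | zero =>
    intro res cnt t i hct hf
    have : t - cnt = 0 := by omega
    rw [this, fillZ_zero]
    simp [bFill]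
  | succ f ih =>
    intro res cnt t i hct hf
    by_cases hlt : cnt < t
    · have hcond : ((cnt:Int)) < (t:Int) := by exact_mod_cast hlt
      by_cases hb : res.testBit i
      · have hland : ¬ (Int.land (res:Int) (Int.shiftLeft 1 i) = 0) := by
          rw [land_pow_zero_iff]; simp [hb]
        have hpc := pcN_sr_succ res i
        rw [sr_odd res i hb] at hpc
        simp only [bFill, if_pos hcond, if_neg hland]
        rw [ih res cnt t (i+1) hct (by omega), fillZ_set res i (t - cnt) hb (by omega)]
      · have hland : Int.land (res:Int) (Int.shiftLeft 1 i) = 0 := by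
          rw [land_pow_zero_iff]; simpa using hb
        have hlor : Int.lor (res:Int) (Int.shiftLeft 1 i) = ((res + 2 ^ i : Nat) : Int) := by
          rw [one_shl, lor_cast, lor_two_pow_of_unset res i (by simpa using hb)]
        have hsr := shiftRight_add_two_pow res i (by simpa using hb)
        have hpc := pcN_sr_succ res i
        rw [sr_even res i (by simpa using hb)] at hpc
        have hcnt1 : ((cnt:Int)) + 1 = ((cnt + 1 : Nat) : Int) := by push_cast; ring
        simp only [bFill, if_pos hcond, if_pos hland, hlor, hcnt1]
        rw [ih (res + 2 ^ i) (cnt + 1) t (i+1) (by omega) (by rw [hsr]; omega),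
          fillZ_unset res i (t - cnt) (by simpa using hb) (by omega), Nat.sub_sub]
    · have hcond : ¬ (((cnt:Int)) < (t:Int)) := by exact_mod_cast hlt
      have : t - cnt = 0 := by omega
      rw [this, fillZ_zero]
      simp [bFill, hcond]


theorem sr_eq_even (m i : Nat) (h : m.testBit i = false) :
    m >>> i = 2 * (m >>> (i+1)) := by
  have h1 := Nat.shiftRight_succ m i
  have h2 := sr_even m i h
  omega

theorem sr_eq_odd (m i : Nat) (h : m.testBit i = true) :
    m >>> i = 2 * (m >>> (i+1)) + 1 := by
  have h1 := Nat.shiftRight_succ m i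
  have h2 := sr_odd m i h
  omega

theorem arg_even (res m i : Nat) (h : m.testBit i = false) :
    res + 2 ^ i * (m >>> i) + 2 ^ i = (res + 2 ^ i) + 2 ^ (i+1) * (m >>> (i+1)) := by
  rw [sr_eq_even m i h, pow_succ]; ring

theorem arg_odd (res m i : Nat) (h : m.testBit i = true) :
    res + 2 ^ i * (m >>> i) = (res + 2 ^ i) + 2 ^ (i+1) * (m >>> (i+1)) := by
  rw [sr_eq_odd m i h, pow_succ]; ring

theorem aInner_stop (f : Nat) (num1 res c1 c2 : Int) (i : Nat)
    (h : ¬ (c2 - c1 > 0 ∧ Int.land num1 (Int.shiftLeft 1 i) = 0)) :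
    aInner f num1 res c1 c2 i = (res, c2, i) := by
  cases f <;> simp only [aInner, if_neg h]

theorem aInner_eq (f : Nat) : ∀ (m res c2 i : Nat) (c1 : Nat),
    res < 2 ^ i → m.testBit i = false → c1 = pcN (m >>> i) → c1 < c2 → c2 - c1 ≤ f →
    ∃ (res' c2' i' : Nat), aInner f (m:Int) (res:Int) (c1:Int) (c2:Int) i = ((res':Int), (c2':Int), i') ∧
      res' < 2 ^ i' ∧ c1 = pcN (m >>> i') ∧ c1 ≤ c2' ∧ c2' < c2 ∧ i < i' ∧
      fillZ (res + 2 ^ i * (m >>> i)) i (c2 - c1) =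
        fillZ (res' + 2 ^ i' * (m >>> i')) i' (c2' - c1) := by
  induction f with
  | zero =>
    intro m res c2 i c1 hres hb hpc hlt hf
    omega
  | succ f ih =>
    intro m res c2 i c1 hres hb hpc hlt hf
    have hcond : ((c2:Int)) - (c1:Int) > 0 ∧ Int.land (m:Int) (Int.shiftLeft 1 i) = 0 := by
      constructor
      · have : (c1:Int) < (c2:Int) := by exact_mod_cast hlt
        omega
      · rw [land_pow_zero_iff]; exact hb
    have hsl : ((res:Int)) + Int.shiftLeft 1 i = ((res + 2 ^ i : Nat) : Int) := by
      rw [one_shl]; push_cast; ring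
    have hc2s : ((c2:Int)) - 1 = ((c2 - 1 : Nat) : Int) := by omega
    have hres' : res + 2 ^ i < 2 ^ (i+1) := by
      have : (2:Nat) ^ (i+1) = 2 ^ i + 2 ^ i := by ring
      omega
    have hpc' : c1 = pcN (m >>> (i+1)) := by
      have := pcN_sr_succ m i
      rw [sr_even m i hb] at this
      omega
    have hstep : fillZ (res + 2 ^ i * (m >>> i)) i (c2 - c1) =
        fillZ ((res + 2 ^ i) + 2 ^ (i+1) * (m >>> (i+1))) (i+1) ((c2 - 1) - c1) := by
      have hbit : (res + 2 ^ i * (m >>> i)).testBit i = false := by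
        rw [testBit_add_mul res (m >>> i) i hres, sr_even m i hb]
        simp
      rw [fillZ_unset _ i (c2 - c1) hbit (by omega), arg_even res m i hb]
      congr 1
      omega
    simp only [aInner, if_pos hcond, hsl, hc2s]
    by_cases hcont : c1 < c2 - 1 ∧ m.testBit (i+1) = false
    · obtain ⟨r', c', i', heq, h1, h2, h3, h4, h5, h6⟩ :=
        ih m (res + 2 ^ i) (c2 - 1) (i+1) c1 hres' hcont.2 hpc' hcont.1 (by omega)
      exact ⟨r', c', i', heq, h1, h2, h3, by omega, by omega, by rw [hstep, h6]⟩
    · refine ⟨res + 2 ^ i, c2 - 1, i + 1, ?_, hres', hpc', by omega, by omega, by omega, hstep⟩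
      apply aInner_stop
      intro ⟨hg, hl⟩
      rw [land_pow_zero_iff] at hl
      rcases not_and_or.mp hcont with hcc | hbb
      · have : ((c2 - 1 : Nat) : Int) ≤ (c1:Int) := by
          have : c2 - 1 ≤ c1 := by omega
          exact_mod_cast this
        omega
      · exact hbb hl

theorem aOuter_eq (f : Nat) : ∀ (m res c1 c2 i : Nat),
    res < 2 ^ i → c1 = pcN (m >>> i) → c1 ≤ c2 → c2 + c1 + (m + 1 - i) ≤ f →
    aOuter f (m:Int) (res:Int) (c1:Int) (c2:Int) i =
      (fillZ (res + 2 ^ i * (m >>> i)) i (c2 - c1) : Int) := by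
  induction f with
  | zero =>
    intro m res c1 c2 i hres hpc hle hf
    have hc2 : c2 = 0 := by omega
    have hc1 : c1 = 0 := by omega
    have him : i ≥ m + 1 := by omega
    have hsr0 : m >>> i = 0 := by
      rw [Nat.shiftRight_eq_div_pow]
      apply Nat.div_eq_of_lt
      calc m < 2 ^ m := Nat.lt_two_pow_self
      _ ≤ 2 ^ i := Nat.pow_le_pow_right (by norm_num) (by omega)
    subst hc2
    simp [aOuter, hsr0, fillZ_zero, hc1]
  | succ f ih =>
    intro m res c1 c2 i hres hpc hle hf
    by_cases hc2 : c2 = 0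
    · have hc1 : c1 = 0 := by omega
      have hsr0 : m >>> i = 0 := by
        subst hc2
        have := (pcN_eq_zero_iff (m >>> i)).mp (by omega)
        exact this
      subst hc2
      simp [aOuter, hsr0, fillZ_zero, hc1]
    · have hcond : ((c2:Int)) > 0 := by exact_mod_cast Nat.pos_of_ne_zero hc2
      by_cases hb : m.testBit i
      · -- set bit: copy it into res
        have hland : ¬ (Int.land (m:Int) (Int.shiftLeft 1 i) = 0) := by
          rw [land_pow_zero_iff]; simp [hb]
        have hc1pos : 1 ≤ c1 := by
          have := pcN_sr_succ m i
          rw [sr_odd m i hb] at this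
          omega
        have hxor : Int.xor (res:Int) (Int.shiftLeft 1 i) = ((res + 2 ^ i : Nat) : Int) := by
          rw [one_shl, xor_cast, xor_two_pow_of_lt res i hres]
        have hc1s : ((c1:Int)) - 1 = ((c1 - 1 : Nat) : Int) := by omega
        have hc2s : ((c2:Int)) - 1 = ((c2 - 1 : Nat) : Int) := by omega
        have hres' : res + 2 ^ i < 2 ^ (i+1) := by
          have : (2:Nat) ^ (i+1) = 2 ^ i + 2 ^ i := by ring
          omega
        have hpc' : c1 - 1 = pcN (m >>> (i+1)) := by
          have := pcN_sr_succ m i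
          rw [sr_odd m i hb] at this
          omega
        simp only [aOuter, if_pos hcond, if_pos hland, hxor, hc1s, hc2s]
        rw [ih m (res + 2 ^ i) (c1 - 1) (c2 - 1) (i+1) hres' hpc' (by omega) (by omega)]
        congr 1
        have harg := arg_odd res m i hb
        by_cases hk : c2 - c1 = 0
        · rw [show (c2 - 1) - (c1 - 1) = 0 from by omega, hk, fillZ_zero, fillZ_zero, harg]
        · have hbit : (res + 2 ^ i * (m >>> i)).testBit i = true := by
            rw [testBit_add_mul res (m >>> i) i hres, sr_odd m i hb]
            simp
          rw [fillZ_set _ i (c2 - c1) hbit hk, harg]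
          congr 1
          omega
      · by_cases hgt : c1 < c2
        · -- unset bit, fills pending: the inner while loop runs
          have hland : Int.land (m:Int) (Int.shiftLeft 1 i) = 0 := by
            rw [land_pow_zero_iff]; simpa using hb
          have hinner : ((c2:Int)) - (c1:Int) > 0 := by
            have : (c1:Int) < (c2:Int) := by exact_mod_cast hgt
            omega
          obtain ⟨r', c', i', heq, h1, h2, h3, h4, h5, h6⟩ :=
            aInner_eq (f+1) m res c2 i c1 hres (by simpa using hb) hpc hgt (by omega)
          simp only [aOuter, if_pos hcond, if_neg (not_not_intro hland), if_pos hinner, heq]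
          rw [ih m r' c1 c' i' h1 h2 h3 (by omega), h6]
        · -- unset bit, no fills pending (c1 = c2): just advance i
          have hceq : c1 = c2 := by omega
          have hland : Int.land (m:Int) (Int.shiftLeft 1 i) = 0 := by
            rw [land_pow_zero_iff]; simpa using hb
          have hinner : ¬ (((c2:Int)) - (c1:Int) > 0) := by
            have : (c2:Int) = (c1:Int) := by exact_mod_cast hceq.symm
            omega
          have hsrne : m >>> i ≠ 0 := by
            intro h0
            rw [h0] at hpc
            simp [pcN_zero] at hpc
            omega
          have hile : 2 ^ i ≤ m := by
            rw [Nat.shiftRight_eq_div_pow] at hsrne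
            by_contra hc
            exact hsrne (Nat.div_eq_of_lt (by omega))
          have him : i < m := lt_of_lt_of_le (Nat.lt_two_pow_self) hile
          have hpc' : c1 = pcN (m >>> (i+1)) := by
            have := pcN_sr_succ m i
            rw [sr_even m i (by simpa using hb)] at this
            omega
          simp only [aOuter, if_pos hcond, if_neg (not_not_intro hland), if_neg hinner]
          rw [ih m res c1 c2 (i+1) (lt_of_lt_of_le hres (by
              have : (2:Nat) ^ (i+1) = 2 ^ i + 2 ^ i := by ring
              omega)) hpc' hle (by omega)]
          rw [show c2 - c1 = 0 from by omega, fillZ_zero, fillZ_zero]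
          rw [sr_eq_even m i (by simpa using hb), pow_succ]
          push_cast
          ring

-- ===== VERDICT (by name: the statement is the Claim_ definition above) =====
theorem minimiseXOR_spec : Claim_equal_minimiseXOR := by
  intro num1 num2 _ hpre
  unfold Spec_minimiseXOR
  obtain ⟨h1, h2⟩ := hpre
  obtain ⟨m1, rfl⟩ := Int.eq_ofNat_of_zero_le h1
  obtain ⟨m2, rfl⟩ := Int.eq_ofNat_of_zero_le h2
  simp only [minimiseXOR, minimiseXOR_alt]
  rw [countSetBitsA_eq, countSetBitsA_eq, popcountB_eq, Int.natAbs_natCast, Int.natAbs_natCast]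
  have hp1 := pcN_le m1
  have hp2 := pcN_le m2
  have hstripB := bStrip_eq (m1+1) m1 (pcN m2) (by omega)
  rcases lt_trichotomy (pcN m1) (pcN m2) with hlt | heq | hgt
  · -- num1 has fewer set bits: A fills via its nested loop, B fills after a no-op strip
    rw [if_neg (by exact_mod_cast Nat.ne_of_lt hlt),
      if_pos (by exact_mod_cast hlt)]
    rw [show ((0:Int)) = ((0:Nat):Int) from rfl,
      aOuter_eq (2 * m1 + m2 + 2) m1 0 (pcN m1) (pcN m2) 0
        (by positivity) (by rw [Nat.shiftRight_zero]) (by omega) (by omega)]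
    rw [show (pcN m1 - pcN m2) = 0 from by omega] at hstripB
    rw [hstripB]
    simp only [stripIter]
    rw [popcountB_eq,
      bFill_eq (m1 + m2 + 2) m1 (pcN m1) (pcN m2) 0 (by omega)
        (by rw [Nat.shiftRight_zero]; omega)]
    simp [Nat.shiftRight_zero]
  · -- equal popcounts: A returns num1, B's two loops are no-ops
    rw [if_pos (by exact_mod_cast heq)]
    rw [show (pcN m1 - pcN m2) = 0 from by omega] at hstripB
    rw [hstripB]
    simp only [stripIter]
    rw [popcountB_eq,
      bFill_eq (m1 + m2 + 2) m1 (pcN m1) (pcN m2) 0 (by omega)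
        (by rw [Nat.shiftRight_zero]; omega)]
    rw [show (pcN m2 - pcN m1) = 0 from by omega, fillZ_zero]
  · -- num1 has more set bits: both strip lowest set bits, B's fill is a no-op
    rw [if_neg (by exact_mod_cast Nat.ne_of_gt hgt),
      if_neg (by exact_mod_cast not_lt.mpr (Nat.le_of_lt hgt))]
    rw [aStrip_eq (m1+1) (pcN m1 - pcN m2) m1 _ _ (by omega) (by omega) (by omega)]
    rw [hstripB, popcountB_eq, pcN_stripIter (pcN m1 - pcN m2) m1 (by omega)]
    rw [show (pcN m1 - (pcN m1 - pcN m2)) = pcN m2 from by omega]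
    rw [bFill_eq (m1 + m2 + 2) _ (pcN m2) (pcN m2) 0 (by omega)
        (by rw [Nat.shiftRight_zero, pcN_stripIter _ _ (by omega)]; omega)]
    rw [show (pcN m2 - pcN m2) = 0 from by omega, fillZ_zero]
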